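-- pv_equiv track=rewrite | github.com/mo124121/atcoder-activity | python/other/ABC254D.py | solve
-- ===== SOURCE A (Python) =====
-- def solve(N):
--     ret = 0
--
--     for i in range(1, N + 1):
--         k = i
--         j = 2
--         while j**2 <= k:
--             while k % j**2 == 0:
--                 k //= j**2
--             j += 1
--
--         j = 1
--         while k * j**2 <= N:
--             ret += 1
--             j += 1
--     return ret
-- ===== SOURCE B (Python) =====
-- def solve(N):
--     total = 0
--     for i in range(1, N + 1):
--         # d := isqrt(i)
--         d = 1
--         while (d + 1) * (d + 1) <= i:
--             d += 1
--         # largest d with d*d dividing i (found from isqrt(i) downward)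
--         while i % (d * d) != 0:
--             d -= 1
--         k = i // (d * d)          # squarefree part of i
--         t = N // k
--         j = 1
--         while j * j <= t:         # j-1 = isqrt(N // k)
--             j += 1
--         total += j - 1
--     return total
-- ===== Notes on version B (the rewrite author's own statement) =====
-- stated objective: alternative
-- what changed: Instead of stripping square factors j^2 upward by trial division and counting j with k*j^2<=N in a loop keyed to N, B finds the largest square divisor d^2 of i by scanning down from isqrt(i), takes k=i//d^2 as the squarefree part, and adds isqrt(N//k) computed by a simple upward scan of j with j*j<=N//k.
import Mathlib
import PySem

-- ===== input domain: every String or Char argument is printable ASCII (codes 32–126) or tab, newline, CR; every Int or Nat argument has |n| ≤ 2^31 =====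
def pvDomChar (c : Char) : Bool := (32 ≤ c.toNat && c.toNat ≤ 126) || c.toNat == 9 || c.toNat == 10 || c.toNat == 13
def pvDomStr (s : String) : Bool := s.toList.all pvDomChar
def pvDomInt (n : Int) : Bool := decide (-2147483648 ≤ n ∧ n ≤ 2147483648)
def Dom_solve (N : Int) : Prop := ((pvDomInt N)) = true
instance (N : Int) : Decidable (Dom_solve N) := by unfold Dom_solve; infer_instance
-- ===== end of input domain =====

-- B replaces A's square-stripping trial division by a direct search for the largest square
-- divisor d^2 of i (down from isqrt(i)) and sums isqrt(N // k) per i; objective: alternative.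

-- ===== PORT A =====
-- termination lemmas for the while loops (cited by name in decreasing_by below)
theorem pvStripInner_dec {j k : Int} (hj : 2 ≤ j) (hk : 1 ≤ k)
    (hm : PySem.Int.mod k (j * j) = 0) :
    (PySem.Int.floordiv k (j * j)).toNat < k.toNat := by
  obtain ⟨q, hq⟩ := (PySem.Int.mod_eq_zero_iff_dvd k (j * j)).mp hm
  have hjj : (0 : Int) < j * j := by nlinarith
  have he : PySem.Int.floordiv k (j * j) = q := by
    rw [PySem.Int.floordiv_eq_ediv_of_pos hjj, hq,
      Int.mul_ediv_cancel_left _ (by positivity)]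
  have hq1 : 1 ≤ q := by nlinarith
  have hqk : q < k := by nlinarith
  omega

-- inner loop:  while k % j**2 == 0: k //= j**2      (totality guards: 2 ≤ j, 1 ≤ k)
def stripInner (j k : Int) : Int :=
  if h : 2 ≤ j ∧ 1 ≤ k ∧ PySem.Int.mod k (j * j) = 0 then
    stripInner j (PySem.Int.floordiv k (j * j))
  else k
termination_by k.toNat
decreasing_by exact pvStripInner_dec h.1 h.2.1 h.2.2

theorem stripInner_bounds_aux (j : Int) (n : ℕ) :
    ∀ k : Int, k.toNat ≤ n → 1 ≤ k → 1 ≤ stripInner j k ∧ stripInner j k ≤ k := by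
  induction n with
  | zero => intro k hn hk; omega
  | succ n ih =>
    intro k hn hk
    rw [stripInner]
    split
    · rename_i h
      obtain ⟨hj, -, hm⟩ := h
      obtain ⟨q, hq⟩ := (PySem.Int.mod_eq_zero_iff_dvd k (j * j)).mp hm
      have hjj : (0 : Int) < j * j := by nlinarith
      have he : PySem.Int.floordiv k (j * j) = q := by
        rw [PySem.Int.floordiv_eq_ediv_of_pos hjj, hq,
          Int.mul_ediv_cancel_left _ (by positivity)]
      have hq1 : 1 ≤ q := by nlinarith
      have hqk : q < k := by nlinarith
      rw [he]
      have := ih q (by omega) hq1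
      exact ⟨this.1, by nlinarith [this.2]⟩
    · exact ⟨hk, le_refl k⟩

theorem stripInner_bounds (j k : Int) (hk : 1 ≤ k) :
    1 ≤ stripInner j k ∧ stripInner j k ≤ k :=
  stripInner_bounds_aux j k.toNat k le_rfl hk

theorem pvStripOuter_dec {j k : Int} (hg : j * j ≤ k) (hj : 2 ≤ j) (hk : 1 ≤ k) :
    (stripInner j k + 1 - (j + 1)).toNat < (k + 1 - j).toNat := by
  have hb := stripInner_bounds j k hk
  have hjk : j < k := by nlinarith
  omega

-- outer loop:  j = 2; while j**2 <= k: (inner); j += 1      (totality guards: 2 ≤ j, 1 ≤ k)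
def stripOuter (k j : Int) : Int :=
  if h : j * j ≤ k ∧ 2 ≤ j ∧ 1 ≤ k then
    stripOuter (stripInner j k) (j + 1)
  else k
termination_by (k + 1 - j).toNat
decreasing_by exact pvStripOuter_dec h.1 h.2.1 h.2.2

-- count loop:  j = 1; while k * j**2 <= N: ret += 1; j += 1   (totality guards: 1 ≤ k, 1 ≤ j)
def countLoop (N k ret j : Int) : Int :=
  if h : k * (j * j) ≤ N ∧ 1 ≤ k ∧ 1 ≤ j then
    countLoop N k (ret + 1) (j + 1)
  else ret
termination_by (N + 1 - j).toNat
decreasing_by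
  obtain ⟨hg, hk, hj⟩ := h
  have : j ≤ N := by nlinarith
  omega

def solve (N : Int) : Int :=
  (PySem.List.pyRange 1 (N + 1) 1).foldl
    (fun ret i => countLoop N (stripOuter i 2) ret 1) 0

-- ===== PORT B =====
-- d = 1; while (d+1)*(d+1) <= i: d += 1      (totality guard: 1 ≤ d)
def isqrtLoop (i d : Int) : Int :=
  if h : (d + 1) * (d + 1) ≤ i ∧ 1 ≤ d then isqrtLoop i (d + 1) else d
termination_by (i - d).toNat
decreasing_by
  obtain ⟨hg, hd⟩ := h
  have : d < i := by nlinarith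
  omega

-- while i % (d*d) != 0: d -= 1      (totality guard: 1 ≤ d)
def downLoop (i d : Int) : Int :=
  if h : ¬ PySem.Int.mod i (d * d) = 0 ∧ 1 ≤ d then downLoop i (d - 1) else d
termination_by d.toNat
decreasing_by omega

-- j = 1; while j*j <= t: j += 1      (totality guard: 1 ≤ j)
def jLoop (t j : Int) : Int :=
  if h : j * j ≤ t ∧ 1 ≤ j then jLoop t (j + 1) else j
termination_by (t + 1 - j).toNat
decreasing_by
  obtain ⟨hg, hj⟩ := h
  have : j ≤ t := by nlinarith
  omega

def solve_alt (N : Int) : Int :=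
  (PySem.List.pyRange 1 (N + 1) 1).foldl
    (fun total i =>
      let d := downLoop i (isqrtLoop i 1)
      let k := PySem.Int.floordiv i (d * d)
      let t := PySem.Int.floordiv N k
      total + (jLoop t 1 - 1)) 0

-- ===== PRECONDITION & SPEC =====
def Spec_solve (N : Int) (out : Int) : Prop := out = solve_alt N
instance (N : Int) (out : Int) : Decidable (Spec_solve N out) := by unfold Spec_solve; infer_instance

-- ===== CLAIM (what is proved, stated in full; the proofs are below) =====
def Claim_equal_solve : Prop := ∀ (N : Int), Dom_solve N → Spec_solve N (solve N)

-- ===== LEMMAS AND PROOFS =====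

-- "no square of an integer ≥ 2 divides r"
def SqfreeInt (r : Int) : Prop := ∀ m : Int, 2 ≤ m → ¬ (m * m ∣ r)

theorem stripInner_spec (j : Int) (n : ℕ) :
    ∀ k : Int, k.toNat ≤ n → 2 ≤ j → 1 ≤ k →
      (∃ e : ℕ, k = stripInner j k * (j ^ e * j ^ e)) ∧ ¬ (j * j ∣ stripInner j k) := by
  induction n with
  | zero => intro k hn hj hk; omega
  | succ n ih =>
    intro k hn hj hk
    rw [stripInner]
    split
    · rename_i h
      obtain ⟨-, -, hm⟩ := h
      obtain ⟨q, hq⟩ := (PySem.Int.mod_eq_zero_iff_dvd k (j * j)).mp hm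
      have hjj : (0 : Int) < j * j := by nlinarith
      have he : PySem.Int.floordiv k (j * j) = q := by
        rw [PySem.Int.floordiv_eq_ediv_of_pos hjj, hq,
          Int.mul_ediv_cancel_left _ (by positivity)]
      have hq1 : 1 ≤ q := by nlinarith
      have hqk : q < k := by nlinarith
      rw [he]
      obtain ⟨⟨e, he1⟩, he2⟩ := ih q (by omega) hj hq1
      refine ⟨⟨e + 1, ?_⟩, he2⟩
      rw [hq]
      conv_lhs => rw [he1]
      ring
    · rename_i h
      push_neg at h
      refine ⟨⟨0, by ring_nf⟩, fun hd => ?_⟩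
      exact h hj hk ((PySem.Int.mod_eq_zero_iff_dvd k (j * j)).mpr hd)

theorem stripOuter_spec (n : ℕ) :
    ∀ k j : Int, (k + 1 - j).toNat ≤ n → 2 ≤ j → 1 ≤ k →
      (∀ m : Int, 2 ≤ m → m < j → ¬ (m * m ∣ k)) →
      1 ≤ stripOuter k j ∧ (∃ s : Int, 1 ≤ s ∧ stripOuter k j * (s * s) = k) ∧
        SqfreeInt (stripOuter k j) := by
  induction n with
  | zero =>
    intro k j hn hj hk hinv
    rw [stripOuter]
    split
    · rename_i h
      have : j < k := by nlinarith [h.1]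
      omega
    · refine ⟨hk, ⟨1, by norm_num⟩, fun m hm hd => ?_⟩
      rename_i h
      push_neg at h
      have hgk : k < j * j := by
        by_contra hc
        push_neg at hc
        have := h hc hj
        omega
      have hmm : m * m ≤ k := Int.le_of_dvd (by omega) hd
      rcases (by omega : m < j ∨ j ≤ m) with hlt | hge
      · exact hinv m hm hlt hd
      · nlinarith
  | succ n ih =>
    intro k j hn hj hk hinv
    rw [stripOuter]
    split
    · rename_i h
      obtain ⟨hg, -, -⟩ := h
      have hjk : j < k := by nlinarith
      have hb := stripInner_bounds j k hk
      obtain ⟨⟨e, he1⟩, he2⟩ := stripInner_spec j k.toNat k le_rfl hj hk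
      have hje : (1 : Int) ≤ j ^ e := one_le_pow₀ (by omega)
      have hinv' : ∀ m : Int, 2 ≤ m → m < j + 1 → ¬ (m * m ∣ stripInner j k) := by
        intro m hm hmj hd
        rcases lt_or_eq_of_le (by omega : m ≤ j) with hlt | heq
        · exact hinv m hm hlt (hd.trans ⟨j ^ e * j ^ e, he1⟩)
        · subst heq; exact he2 hd
      obtain ⟨h1, ⟨s, hs1, hs2⟩, h3⟩ :=
        ih (stripInner j k) (j + 1) (by omega) (by omega) hb.1 hinv'
      refine ⟨h1, ⟨s * j ^ e, by nlinarith, ?_⟩, h3⟩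
      linear_combination (j ^ e * j ^ e) * hs2 - he1
    · refine ⟨hk, ⟨1, by norm_num⟩, fun m hm hd => ?_⟩
      rename_i h
      push_neg at h
      have hgk : k < j * j := by
        by_contra hc
        push_neg at hc
        have := h hc hj
        omega
      have hmm : m * m ≤ k := Int.le_of_dvd (by omega) hd
      rcases (by omega : m < j ∨ j ≤ m) with hlt | hge
      · exact hinv m hm hlt hd
      · nlinarith

theorem isqrtLoop_spec (n : ℕ) :
    ∀ i d : Int, (i - d).toNat ≤ n → 1 ≤ d → d * d ≤ i →
      1 ≤ isqrtLoop i d ∧ isqrtLoop i d * isqrtLoop i d ≤ i ∧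
        i < (isqrtLoop i d + 1) * (isqrtLoop i d + 1) := by
  induction n with
  | zero =>
    intro i d hn hd hdd
    rw [isqrtLoop]
    split
    · rename_i h
      have : d < i := by nlinarith [h.1, h.2]
      omega
    · rename_i h
      push_neg at h
      have hng : i < (d + 1) * (d + 1) := by
        by_contra hc
        push_neg at hc
        have := h hc
        omega
      exact ⟨hd, hdd, by nlinarith⟩
  | succ n ih =>
    intro i d hn hd hdd
    rw [isqrtLoop]
    split
    · rename_i h
      have : d < i := by nlinarith [h.1, h.2]
      exact ih i (d + 1) (by omega) (by omega) h.1
    · rename_i h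
      push_neg at h
      have hng : i < (d + 1) * (d + 1) := by
        by_contra hc
        push_neg at hc
        have := h hc
        omega
      exact ⟨hd, hdd, by nlinarith⟩

theorem downLoop_spec (n : ℕ) :
    ∀ i d : Int, d.toNat ≤ n → 1 ≤ d → 1 ≤ i →
      1 ≤ downLoop i d ∧ downLoop i d ≤ d ∧ (downLoop i d * downLoop i d ∣ i) ∧
        ∀ e : Int, downLoop i d < e → e ≤ d → ¬ (e * e ∣ i) := by
  induction n with
  | zero => intro i d hn hd hi; omega
  | succ n ih =>
    intro i d hn hd hi
    rw [downLoop]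
    split
    · rename_i h
      obtain ⟨hm, -⟩ := h
      have hd2 : 2 ≤ d := by
        by_contra hc
        have hd1 : d = 1 := by omega
        subst hd1
        exact hm ((PySem.Int.mod_eq_zero_iff_dvd i 1).mpr (by simpa using one_dvd i))
      obtain ⟨g1, g2, g3, g4⟩ := ih i (d - 1) (by omega) (by omega) hi
      refine ⟨g1, by omega, g3, fun e he1 he2 hdvd => ?_⟩
      rcases (by omega : e ≤ d - 1 ∨ e = d) with hlt | heq
      · exact g4 e he1 hlt hdvd
      · subst heq
        exact hm ((PySem.Int.mod_eq_zero_iff_dvd _ _).mpr hdvd)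
    · rename_i h
      push_neg at h
      have hmz : PySem.Int.mod i (d * d) = 0 := by
        by_contra hc
        have := h hc
        omega
      exact ⟨hd, le_refl d, (PySem.Int.mod_eq_zero_iff_dvd i (d * d)).mp hmz,
        fun e he1 he2 _ => by omega⟩

theorem countLoop_eq (n : ℕ) :
    ∀ N k ret j : Int, (N + 1 - j).toNat ≤ n → 1 ≤ k → 1 ≤ j →
      countLoop N k ret j = ret + (jLoop (PySem.Int.floordiv N k) j - j) := by
  induction n with
  | zero =>
    intro N k ret j hn hk hj
    rw [countLoop]
    split
    · rename_i h
      have : j ≤ N := by nlinarith [h.1]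
      omega
    · rename_i h
      push_neg at h
      have hNg : ¬ (k * (j * j) ≤ N) := fun hg => by have := h hg hk; omega
      have hng : ¬ (j * j ≤ PySem.Int.floordiv N k) := by
        rw [PySem.Int.le_floordiv_iff_mul_le (by omega)]
        intro hc
        exact hNg (by nlinarith)
      rw [jLoop, dif_neg (by tauto)]
      omega
  | succ n ih =>
    intro N k ret j hn hk hj
    rw [countLoop]
    split
    · rename_i h
      obtain ⟨hg, -, -⟩ := h
      have hjN : j ≤ N := by nlinarith
      have hjg : j * j ≤ PySem.Int.floordiv N k := by
        rw [PySem.Int.le_floordiv_iff_mul_le (by omega)]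
        nlinarith
      rw [ih N k (ret + 1) (j + 1) (by omega) hk (by omega)]
      conv_rhs => rw [jLoop]
      rw [dif_pos ⟨hjg, hj⟩]
      generalize jLoop (PySem.Int.floordiv N k) (j + 1) = X
      ring
    · rename_i h
      push_neg at h
      have hNg : ¬ (k * (j * j) ≤ N) := fun hg => by have := h hg hk; omega
      have hng : ¬ (j * j ≤ PySem.Int.floordiv N k) := by
        rw [PySem.Int.le_floordiv_iff_mul_le (by omega)]
        intro hc
        exact hNg (by nlinarith)
      rw [jLoop, dif_neg (by tauto)]
      omega

theorem nat_sf_unique (a b s t : ℕ) (ha : a ≠ 0) (hb : b ≠ 0) (hs : s ≠ 0) (ht : t ≠ 0)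
    (hA : Squarefree a) (hB : Squarefree b) (h : a * (s * s) = b * (t * t)) : a = b := by
  apply Nat.eq_of_factorization_eq ha hb
  intro p
  have h1 : (a * (s * s)).factorization p = (b * (t * t)).factorization p := by rw [h]
  rw [Nat.factorization_mul ha (Nat.mul_ne_zero hs hs),
    Nat.factorization_mul hb (Nat.mul_ne_zero ht ht),
    Nat.factorization_mul hs hs, Nat.factorization_mul ht ht] at h1
  simp only [Finsupp.add_apply] at h1
  have hA1 := (Nat.squarefree_iff_factorization_le_one ha).mp hA p
  have hB1 := (Nat.squarefree_iff_factorization_le_one hb).mp hB p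
  omega

theorem int_sf_unique (a b s t : Int) (ha : 1 ≤ a) (hb : 1 ≤ b) (hs : 1 ≤ s) (ht : 1 ≤ t)
    (hA : SqfreeInt a) (hB : SqfreeInt b) (h : a * (s * s) = b * (t * t)) : a = b := by
  have key : ∀ x : Int, 1 ≤ x → SqfreeInt x → Squarefree x.toNat := by
    intro x hx hsf m hm
    rcases Nat.lt_or_ge m 2 with h2 | h2
    · interval_cases m
      · simp at hm; omega
      · exact isUnit_one
    · exfalso
      apply hsf (m : Int) (by exact_mod_cast h2)
      have : ((m * m : ℕ) : Int) ∣ ((x.toNat : ℕ) : Int) := Int.natCast_dvd_natCast.mpr hm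
      rwa [Int.toNat_of_nonneg (by omega), Nat.cast_mul] at this
  have heq : a.toNat * (s.toNat * s.toNat) = b.toNat * (t.toNat * t.toNat) := by
    have h' : ((a.toNat * (s.toNat * s.toNat) : ℕ) : Int)
        = ((b.toNat * (t.toNat * t.toNat) : ℕ) : Int) := by
      push_cast
      rw [Int.toNat_of_nonneg (by omega), Int.toNat_of_nonneg (by omega),
        Int.toNat_of_nonneg (by omega), Int.toNat_of_nonneg (by omega)]
      exact h
    exact_mod_cast h'
  have := nat_sf_unique a.toNat b.toNat s.toNat t.toNat (by omega) (by omega) (by omega)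
    (by omega) (key a ha hA) (key b hb hB) heq
  omega

-- the two squarefree parts coincide
theorem core_eq (i : Int) (hi : 1 ≤ i) :
    stripOuter i 2 =
      PySem.Int.floordiv i (downLoop i (isqrtLoop i 1) * downLoop i (isqrtLoop i 1)) := by
  obtain ⟨hA1, ⟨s, hs1, hs2⟩, hA3⟩ :=
    stripOuter_spec (i + 1 - 2).toNat i 2 le_rfl (by omega) hi
      (fun m hm hmj => by omega)
  obtain ⟨hD1, hD2, hD3⟩ :=
    isqrtLoop_spec (i - 1).toNat i 1 le_rfl (by omega) (by omega)
  set D := isqrtLoop i 1 with hD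
  obtain ⟨hd1, hd2, hd3, hd4⟩ := downLoop_spec D.toNat i D le_rfl hD1 hi
  set dd := downLoop i D with hdd
  obtain ⟨q, hq⟩ := hd3
  have hddp : (0 : Int) < dd * dd := by nlinarith
  have hfl : PySem.Int.floordiv i (dd * dd) = q := by
    rw [PySem.Int.floordiv_eq_ediv_of_pos hddp, hq,
      Int.mul_ediv_cancel_left _ (by positivity)]
  have hq1 : 1 ≤ q := by nlinarith
  have hBsf : SqfreeInt q := by
    intro m hm hmd
    obtain ⟨q', hq'⟩ := hmd
    have hedvd : (m * dd) * (m * dd) ∣ i := ⟨q', by rw [hq, hq']; ring⟩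
    have he1 : dd < m * dd := by nlinarith
    have hee : (m * dd) * (m * dd) ≤ i := Int.le_of_dvd (by omega) hedvd
    have he2 : m * dd ≤ D := by nlinarith
    exact hd4 (m * dd) he1 he2 hedvd
  rw [hfl]
  exact int_sf_unique (stripOuter i 2) q s dd hA1 hq1 hs1 hd1 hA3 hBsf
    (by rw [hs2, hq]; ring)

theorem foldl_eq_aux (N : Int) :
    ∀ (l : List Int), (∀ x ∈ l, 1 ≤ x) → ∀ acc : Int,
      l.foldl (fun ret i => countLoop N (stripOuter i 2) ret 1) acc =
      l.foldl (fun total i =>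
        let d := downLoop i (isqrtLoop i 1)
        let k := PySem.Int.floordiv i (d * d)
        let t := PySem.Int.floordiv N k
        total + (jLoop t 1 - 1)) acc := by
  intro l
  induction l with
  | nil => intro _ _; rfl
  | cons x xs ih =>
    intro hmem acc
    have hx : 1 ≤ x := hmem x (List.mem_cons_self ..)
    simp only [List.foldl_cons]
    rw [ih (fun y hy => hmem y (List.mem_cons_of_mem x hy))]
    congr 1
    have hk1 : 1 ≤ stripOuter x 2 :=
      (stripOuter_spec (x + 1 - 2).toNat x 2 le_rfl (by omega) hx
        (fun m hm hmj => by omega)).1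
    rw [countLoop_eq (N + 1 - 1).toNat N (stripOuter x 2) acc 1 le_rfl hk1 le_rfl,
      core_eq x hx]

-- ===== VERDICT (by name: the statement is the Claim_ definition above) =====
theorem solve_spec : Claim_equal_solve := by
  intro N _
  show solve N = solve_alt N
  unfold solve solve_alt
  exact foldl_eq_aux N _ (fun x hx => ((PySem.List.mem_pyRange_one).mp hx).1) 0
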